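-- pv_equiv track=rewrite | github.com/tms-course/py-2022 | k64ay/lesson_5/task_5.py | check_num_str
-- ===== SOURCE A (Python) =====
-- def check_num_str(value: str):
--     dot_count = 0
--     if value[0] == '-':
--         neg_sign = True
--         line = value[1:]
--     else:
--         neg_sign = False
--         line = value
--
--     for char in line:
--         if char == '.':
--             dot_count += 1
--
--             if dot_count > 1:
--                 return "Incorrect num"
--             continue
--
--         if char == '-' or not char.isdigit():
--             return "Incorrect num"
--
--     return f"{'отрицательное' if neg_sign else 'положительное'} {'дробное' if dot_count else 'целое'} число"
-- ===== SOURCE B (Python) =====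
-- def check_num_str(value: str):
--     neg = value[0] == '-'
--     line = value[1:] if neg else value
--     if set(line) <= set('0123456789.') and line.count('.') < 2:
--         sign = 'отрицательное' if neg else 'положительное'
--         kind = 'дробное' if '.' in line else 'целое'
--         return f"{sign} {kind} число"
--     return "Incorrect num"
-- ===== Notes on version B (the rewrite author's own statement) =====
-- stated objective: alternative
-- what changed: Replaces A's stateful character-by-character scan (running dot counter with early returns) by a declarative set characterisation: the string's character set must be a subset of the set of digit-and-dot characters and the dot count below 2; validity is no longer decided by a loop with mutable state.
import Mathlib
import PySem

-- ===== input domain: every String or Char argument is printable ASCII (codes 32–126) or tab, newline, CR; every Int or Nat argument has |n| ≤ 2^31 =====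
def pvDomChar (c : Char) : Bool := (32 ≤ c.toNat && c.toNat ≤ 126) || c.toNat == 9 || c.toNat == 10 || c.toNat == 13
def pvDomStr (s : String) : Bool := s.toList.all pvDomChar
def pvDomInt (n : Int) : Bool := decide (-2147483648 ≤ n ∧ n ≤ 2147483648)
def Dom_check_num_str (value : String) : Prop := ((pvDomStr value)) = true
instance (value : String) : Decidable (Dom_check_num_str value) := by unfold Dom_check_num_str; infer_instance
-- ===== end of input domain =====

-- B replaces A's stateful dot-counting scan by a declarative characterisation: the character SET of the
-- string must be a subset of {digits, '.'} and the dot count must be below 2 (objective: alternative).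

-- ===== PORT A =====
-- A's for-loop over line with the running dot counter and early returns
def checkLoopA (cs : List Char) (dotCount : Nat) (negSign : Bool) : String :=
  match cs with
  | [] =>
      (if negSign then "отрицательное" else "положительное") ++ " " ++
      (if dotCount ≠ 0 then "дробное" else "целое") ++ " число"
  | c :: rest =>
      if c = '.' then
        if dotCount + 1 > 1 then "Incorrect num" else checkLoopA rest (dotCount + 1) negSign
      else if c = '-' ∨ ¬ PySem.Chars.isdigit c then "Incorrect num"
      else checkLoopA rest dotCount negSign

def check_num_str (value : String) : String :=
  match value.toList with
  | [] => "!IndexError"   -- value[0] raises IndexError in Python; excluded by Pre_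
  | v0 :: rest =>
      if v0 = '-' then checkLoopA rest 0 true
      else checkLoopA (v0 :: rest) 0 false

-- ===== PORT B =====
-- set('0123456789.')
def allowedSet : PySem.Set Char := PySem.Set.ofList "0123456789.".toList

def check_num_str_alt (value : String) : String :=
  match value.toList with
  | [] => ""   -- value[0] raises IndexError in Python; excluded by Pre_
  | v0 :: rest =>
      let neg := v0 = '-'
      let line := if neg then rest else v0 :: rest
      if PySem.Set.issubset (PySem.Set.ofList line) allowedSet && line.count '.' < 2 then
        (if neg then "отрицательное" else "положительное") ++ " " ++
        (if line.contains '.' then "дробное" else "целое") ++ " число"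
      else "Incorrect num"

-- ===== PRECONDITION & SPEC =====
-- Pre_ excludes only the empty string, on which A (value[0]) raises IndexError (B raises there too).
def Pre_check_num_str (value : String) : Prop := value.toList ≠ []
instance (value : String) : Decidable (Pre_check_num_str value) := by unfold Pre_check_num_str; infer_instance
def pvWitness_check_num_str : String := "-12.5"

def Spec_check_num_str (value : String) (out : String) : Prop := out = check_num_str_alt value
instance (value : String) (out : String) : Decidable (Spec_check_num_str value out) := by unfold Spec_check_num_str; infer_instance

-- ===== CLAIM =====
def Claim_equal_check_num_str : Prop := ∀ (value : String), Dom_check_num_str value → Pre_check_num_str value → Spec_check_num_str value (check_num_str value)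

-- ===== LEMMAS AND PROOFS =====

-- membership in the allowed character set, pointwise
lemma mem_allowed (c : Char) :
    c ∈ allowedSet ↔ (c = '.' ∨ PySem.Chars.isdigit c = true) := by
  have h : allowedSet = ['0','1','2','3','4','5','6','7','8','9','.'] := by decide
  have key : ∀ d : Char, (c = d) ↔ (c.val.toNat = d.val.toNat) :=
    fun d => ⟨fun h => by rw [h], fun h => Char.ext (UInt32.toNat_inj.mp h)⟩
  rw [h]
  simp only [List.mem_cons, List.not_mem_nil, or_false, PySem.Chars.isdigit,
    Bool.and_eq_true, decide_eq_true_eq, Char.le_def, UInt32.le_iff_toNat_le,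
    key '0', key '1', key '2', key '3', key '4', key '5', key '6', key '7',
    key '8', key '9', key '.',
    show ('0' : Char).val.toNat = 48 from rfl, show ('1' : Char).val.toNat = 49 from rfl,
    show ('2' : Char).val.toNat = 50 from rfl, show ('3' : Char).val.toNat = 51 from rfl,
    show ('4' : Char).val.toNat = 52 from rfl, show ('5' : Char).val.toNat = 53 from rfl,
    show ('6' : Char).val.toNat = 54 from rfl, show ('7' : Char).val.toNat = 55 from rfl,
    show ('8' : Char).val.toNat = 56 from rfl, show ('9' : Char).val.toNat = 57 from rfl,
    show ('.' : Char).val.toNat = 46 from rfl]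
  omega

-- set(xs) <= t tests every element of xs
lemma issubset_ofList (xs : List Char) (t : PySem.Set Char) :
    PySem.Set.issubset (PySem.Set.ofList xs) t = xs.all (fun x => PySem.Set.contains t x) := by
  rw [Bool.eq_iff_iff]
  simp only [PySem.Set.issubset, List.all_eq_true, PySem.Set.mem_ofList]

-- once a dot has been seen (dotCount = 1), A accepts iff the rest is all digits
lemma checkLoopA_one (cs : List Char) (neg : Bool) :
    checkLoopA cs 1 neg =
      if cs.all PySem.Chars.isdigit then
        (if neg then "отрицательное" else "положительное") ++ " " ++ "дробное" ++ " число"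
      else "Incorrect num" := by
  induction cs with
  | nil => simp [checkLoopA]
  | cons c rest ih =>
    by_cases hdot : c = '.'
    · subst hdot; simp [checkLoopA, PySem.Chars.isdigit]
    · by_cases hd : PySem.Chars.isdigit c
      · have hne : c ≠ '-' := by
          intro h; subst h; simp [PySem.Chars.isdigit] at hd
        simp [checkLoopA, hdot, hd, hne, ih]
      · simp [checkLoopA, hdot, hd]

-- A's loop from dotCount = 0 equals B's "allowed characters only, fewer than two dots" test
lemma checkLoopA_zero (cs : List Char) (neg : Bool) :
    checkLoopA cs 0 neg =
      if (cs.all (fun c => (c == '.') || PySem.Chars.isdigit c) && decide (cs.count '.' < 2)) then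
        (if neg then "отрицательное" else "положительное") ++ " " ++
        (if cs.contains '.' then "дробное" else "целое") ++ " число"
      else "Incorrect num" := by
  induction cs with
  | nil => simp [checkLoopA]
  | cons c rest ih =>
    by_cases hdot : c = '.'
    · subst hdot
      have hstep : checkLoopA ('.' :: rest) 0 neg = checkLoopA rest 1 neg := by
        simp [checkLoopA]
      rw [hstep, checkLoopA_one]
      by_cases hall : rest.all PySem.Chars.isdigit
      · have hcnt : rest.count '.' = 0 := by
          rw [List.count_eq_zero]
          intro hmem
          have := (List.all_eq_true.mp hall) _ hmem
          simp [PySem.Chars.isdigit] at this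
        have hall' : rest.all (fun c => (c == '.') || PySem.Chars.isdigit c) = true := by
          rw [List.all_eq_true] at hall ⊢
          intro x hx; simp [hall x hx]
        simp [hall, hall', hcnt]
      · have hx := hall
        rw [List.all_eq_true] at hx
        have hx' : ∃ x ∈ rest, PySem.Chars.isdigit x ≠ true := by
          by_contra hno
          exact hx fun x hxmem => by_contra fun h => hno ⟨x, hxmem, h⟩
        obtain ⟨x, hxm, hxd⟩ := hx'
        by_cases hxe : x = '.'
        · subst hxe
          have h1 : 1 ≤ rest.count '.' := List.one_le_count_iff.mpr hxm
          have hc2 : ¬ ((('.' :: rest).all fun c => (c == '.') || PySem.Chars.isdigit c) &&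
              decide (List.count '.' ('.' :: rest) < 2)) = true := by
            simp only [List.count_cons_self, Bool.and_eq_true, decide_eq_true_eq, not_and]
            intro _
            omega
          rw [if_neg hall, if_neg hc2]
        · have hf : rest.all (fun c => (c == '.') || PySem.Chars.isdigit c) = false := by
            rw [List.all_eq_false]
            exact ⟨x, hxm, by simp [hxe, hxd]⟩
          have hc2 : ¬ ((('.' :: rest).all fun c => (c == '.') || PySem.Chars.isdigit c) &&
              decide (List.count '.' ('.' :: rest) < 2)) = true := by
            simp [List.all_cons, hf]
          rw [if_neg hall, if_neg hc2]
    · by_cases hd : PySem.Chars.isdigit c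
      · have hne : c ≠ '-' := by
          intro h; subst h; simp [PySem.Chars.isdigit] at hd
        have hbranch : ¬ (c = '-' ∨ ¬ PySem.Chars.isdigit c = true) := by simp [hne, hd]
        have hstep : checkLoopA (c :: rest) 0 neg = checkLoopA rest 0 neg := by
          rw [checkLoopA]
          rw [if_neg hdot]
          rw [if_neg hbranch]
        rw [hstep, ih]
        have hcnt : List.count '.' (c :: rest) = List.count '.' rest := by
          simp [hdot]
        have hallc : (c :: rest).all (fun c => (c == '.') || PySem.Chars.isdigit c)
            = rest.all (fun c => (c == '.') || PySem.Chars.isdigit c) := by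
          simp [hd]
        have hcont : (c :: rest).contains '.' = rest.contains '.' := by
          simp [Ne.symm hdot]
        rw [hcnt, hallc, hcont]
      · simp [checkLoopA, hdot, hd]

-- ===== VERDICT =====
theorem check_num_str_spec : Claim_equal_check_num_str := by
  intro value _ hpre
  unfold Spec_check_num_str check_num_str check_num_str_alt
  match h : value.toList with
  | [] => exact absurd h hpre
  | v0 :: rest =>
    by_cases hneg : v0 = '-' <;>
      simp [hneg, checkLoopA_zero, issubset_ofList, mem_allowed]
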